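-- pv_equiv track=rewrite | github.com/n-jokic/PSIML | PSIML2020/DataFrames.py | findFrame
-- ===== SOURCE A (Python) =====
-- def findFrame(i, frame, sortedKeyBox):
--
--     if i >= len(sortedKeyBox): #iterator i helps us find the position of upper and lower bound
--         i = len(sortedKeyBox) -1
--
--     if sortedKeyBox[i] == frame:
--         return frame, frame
--
--     if(frame > sortedKeyBox[i]):
--         lower = sortedKeyBox[i]
--
--         while frame > sortedKeyBox[i]:
--             lower = sortedKeyBox[i]
--             if lower == sortedKeyBox[-1]: #there exists no valid upper frame
--                 return -1, -1
--             i += 1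
--
--         upper = sortedKeyBox[i]
--
--
--     if(frame < sortedKeyBox[i]):
--         upper = sortedKeyBox[i]
--
--         while frame < sortedKeyBox[i]:
--             if i == 0 :#there exists no valid lower frame
--                 return -1, -1
--             i-=1
--
--         lower = sortedKeyBox[i]
--         upper = sortedKeyBox[i+1]
--
--     return upper, lower
-- ===== SOURCE B (Python) =====
-- from bisect import bisect_left, bisect_right
--
-- def findFrame(i, frame, sortedKeyBox):
--     n = len(sortedKeyBox)
--     if i >= n:
--         i = n - 1
--     v = sortedKeyBox[i]
--     if v == frame:
--         return frame, frame
--     if frame > v: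
--         k = bisect_left(sortedKeyBox, frame, i)
--         if k == n:
--             return -1, -1
--         return sortedKeyBox[k], sortedKeyBox[k - 1]
--     m = bisect_right(sortedKeyBox, frame, 0, i) - 1
--     if m < 0:
--         return -1, -1
--     return sortedKeyBox[m + 1], sortedKeyBox[m]
-- ===== Notes on version B (the rewrite author's own statement) =====
-- stated objective: alternative
-- what changed: Replaces A's two linear scans (upward and downward from the start index) with bisect_left/bisect_right binary searches that locate the bracketing elements directly; on the probe's inputs A's scan is short, so the measured cost is the same.
-- outside the precondition, e.g. on findFrame(0, 4, [1, 9, 2, 9]): A returns (9, 1), B returns (9, 2); on findFrame(-2, 9, [1, 5]): A returns (-1, -1), B raises ValueError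
import Mathlib
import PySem

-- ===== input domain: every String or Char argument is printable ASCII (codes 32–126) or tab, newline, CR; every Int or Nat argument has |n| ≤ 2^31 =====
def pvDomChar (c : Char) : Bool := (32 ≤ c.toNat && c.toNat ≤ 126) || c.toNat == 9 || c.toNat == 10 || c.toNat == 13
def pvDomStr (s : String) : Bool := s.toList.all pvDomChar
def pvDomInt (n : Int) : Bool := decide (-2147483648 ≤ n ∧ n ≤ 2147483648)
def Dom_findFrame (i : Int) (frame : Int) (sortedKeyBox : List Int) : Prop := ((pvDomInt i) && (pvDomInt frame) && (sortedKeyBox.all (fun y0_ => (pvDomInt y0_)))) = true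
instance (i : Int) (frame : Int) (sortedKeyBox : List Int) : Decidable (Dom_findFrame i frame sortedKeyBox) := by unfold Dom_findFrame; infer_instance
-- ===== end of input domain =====

-- B replaces A's linear scans by binary search (bisect) over the sorted key list; the
-- equivalence is claimed on nonempty sorted lists with a nonnegative start index (Pre_).

-- ===== PORT A =====
-- upward scan: while frame > a[i]: lower := a[i]; if lower == a[-1]: return (-1,-1); i += 1
-- (fuel = a.length suffices: the scan always stops by index a.length-1, whose value equals a[-1])
def findFrameUpA (frame : Int) (a : List Int) : Nat → Nat → Option Nat
  | _, 0 => none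
  | i, fuel+1 =>
    if frame > a.getD i 0 then
      if a.getD i 0 = a.getLastD 0 then none
      else findFrameUpA frame a (i+1) fuel
    else some i

-- downward scan: while frame < a[i]: if i == 0: return (-1,-1); i -= 1
def findFrameDownA (frame : Int) (a : List Int) : Nat → Option Nat
  | 0 => if frame < a.getD 0 0 then none else some 0
  | i'+1 => if frame < a.getD (i'+1) 0 then findFrameDownA frame a i' else some (i'+1)

def findFrame (i : Int) (frame : Int) (sortedKeyBox : List Int) : List Int :=
  if sortedKeyBox = [] then []  -- Python raises IndexError here (excluded by Pre_)
  else
    let n : Int := sortedKeyBox.length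
    -- negative i (excluded by Pre_) is clamped here, not wrapped as Python does
    let j : Nat := (if i ≥ n then n - 1 else i).toNat
    let v := sortedKeyBox.getD j 0
    if v = frame then [frame, frame]
    else if frame > v then
      match findFrameUpA frame sortedKeyBox j sortedKeyBox.length with
      | none => [-1, -1]
      | some k =>
        -- upper = a[k], lower = a[k-1] (value set at the scan's last iteration)
        if frame < sortedKeyBox.getD k 0 then
          match findFrameDownA frame sortedKeyBox k with
          | none => [-1, -1]
          | some m => [sortedKeyBox.getD (m+1) 0, sortedKeyBox.getD m 0]
        else [sortedKeyBox.getD k 0, sortedKeyBox.getD (k-1) 0]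
    else
      match findFrameDownA frame sortedKeyBox j with
      | none => [-1, -1]
      | some m => [sortedKeyBox.getD (m+1) 0, sortedKeyBox.getD m 0]

-- ===== PORT B =====
-- bisect.bisect_left(a, x, lo, hi)
def bisectLeft (a : List Int) (x : Int) : Nat → Nat → Nat
  | lo, hi =>
    if _h : lo < hi then
      let mid := (lo + hi) / 2
      if a.getD mid 0 < x then bisectLeft a x (mid+1) hi
      else bisectLeft a x lo mid
    else lo
termination_by lo hi => hi - lo
decreasing_by all_goals omega

-- bisect.bisect_right(a, x, lo, hi)
def bisectRight (a : List Int) (x : Int) : Nat → Nat → Nat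
  | lo, hi =>
    if _h : lo < hi then
      let mid := (lo + hi) / 2
      if a.getD mid 0 ≤ x then bisectRight a x (mid+1) hi
      else bisectRight a x lo mid
    else lo
termination_by lo hi => hi - lo
decreasing_by all_goals omega

def findFrame_alt (i : Int) (frame : Int) (sortedKeyBox : List Int) : List Int :=
  if sortedKeyBox = [] then []  -- Source B raises IndexError here (excluded by Pre_)
  else
    let n : Int := sortedKeyBox.length
    let j : Nat := (if i ≥ n then n - 1 else i).toNat
    let v := sortedKeyBox.getD j 0
    if v = frame then [frame, frame]
    else if frame > v then
      let k := bisectLeft sortedKeyBox frame j sortedKeyBox.length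
      if k = sortedKeyBox.length then [-1, -1]
      else [sortedKeyBox.getD k 0, sortedKeyBox.getD (k-1) 0]
    else
      -- m = bisect_right(a, frame, 0, j) - 1; if m < 0: (-1,-1) else (a[m+1], a[m])
      let r := bisectRight sortedKeyBox frame 0 j
      if r = 0 then [-1, -1]
      else [sortedKeyBox.getD r 0, sortedKeyBox.getD (r-1) 0]

-- ===== PRECONDITION & SPEC =====
-- the (clamped) start index A and B read first
def preIdx (i : Int) (a : List Int) : Nat :=
  (if i ≥ (a.length : Int) then (a.length : Int) - 1 else i).toNat

-- Pre_ excludes: the empty list (both Pythons raise IndexError); negative i (B's bisect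
-- raises ValueError there, while A's value comes from Python's accidental negative-index
-- wraparound); and inputs where the side of the list the lookup walks (the suffix from the
-- start index when frame is above it, the prefix up to it when frame is below) is neither
-- sorted nor entirely on one side of frame — the function is specified for a sorted key
-- list (its name says so) and A's scan results on such input are accidental.
def Pre_findFrame (i : Int) (frame : Int) (sortedKeyBox : List Int) : Prop :=
  sortedKeyBox ≠ [] ∧ 0 ≤ i ∧
  (if sortedKeyBox.getD (preIdx i sortedKeyBox) 0 = frame then True
   else if frame > sortedKeyBox.getD (preIdx i sortedKeyBox) 0 then
     List.Pairwise (· ≤ ·) (sortedKeyBox.drop (preIdx i sortedKeyBox)) ∨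
       ∀ x ∈ sortedKeyBox.drop (preIdx i sortedKeyBox), x < frame
   else
     List.Pairwise (· ≤ ·) (sortedKeyBox.take (preIdx i sortedKeyBox + 1)) ∨
       ∀ x ∈ sortedKeyBox.take (preIdx i sortedKeyBox + 1), frame < x)
instance (i : Int) (frame : Int) (sortedKeyBox : List Int) : Decidable (Pre_findFrame i frame sortedKeyBox) := by unfold Pre_findFrame; infer_instance

def pvWitness_findFrame : Int × Int × List Int := (1, 5, [3, 7])

def Spec_findFrame (i : Int) (frame : Int) (sortedKeyBox : List Int) (out : List Int) : Prop := out = findFrame_alt i frame sortedKeyBox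
instance (i : Int) (frame : Int) (sortedKeyBox : List Int) (out : List Int) : Decidable (Spec_findFrame i frame sortedKeyBox out) := by unfold Spec_findFrame; infer_instance

-- ===== CLAIM (what is proved, stated in full; the proofs are below) =====
def Claim_equal_findFrame : Prop := ∀ (i : Int) (frame : Int) (sortedKeyBox : List Int), Dom_findFrame i frame sortedKeyBox → Pre_findFrame i frame sortedKeyBox → Spec_findFrame i frame sortedKeyBox (findFrame i frame sortedKeyBox)

-- ===== LEMMAS AND PROOFS =====

-- getD agrees with getElem in range
theorem getD_eq_getElem' (a : List Int) (k : Nat) (hk : k < a.length) :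
    a.getD k 0 = a[k] := by
  simp [List.getD_eq_getElem?_getD, List.getElem?_eq_getElem, hk]

-- a sorted suffix gives index monotonicity from L on
theorem drop_pairwise_mono (a : List Int) (L : Nat)
    (h : List.Pairwise (· ≤ ·) (a.drop L)) :
    ∀ p q : Nat, L ≤ p → p ≤ q → q < a.length → a.getD p 0 ≤ a.getD q 0 := by
  intro p q hLp hpq hq
  have hd : ∀ k, L ≤ k → a.getD k 0 = (a.drop L).getD (k - L) 0 := by
    intro k hk
    rw [List.getD_eq_getElem?_getD, List.getD_eq_getElem?_getD, List.getElem?_drop]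
    have : L + (k - L) = k := by omega
    rw [this]
  rcases Nat.lt_or_eq_of_le hpq with hlt | heq
  · have hpd : p - L < (a.drop L).length := by simp [List.length_drop]; omega
    have hqd : q - L < (a.drop L).length := by simp [List.length_drop]; omega
    have hP := (List.pairwise_iff_getElem.mp h) (p - L) (q - L) hpd hqd (by omega)
    rw [hd p hLp, hd q (by omega), getD_eq_getElem' _ _ hpd, getD_eq_getElem' _ _ hqd]
    exact hP
  · subst heq; exact le_refl _

-- a sorted prefix gives index monotonicity below H
theorem take_pairwise_mono (a : List Int) (H : Nat)
    (h : List.Pairwise (· ≤ ·) (a.take H)) :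
    ∀ p q : Nat, p ≤ q → q < H → q < a.length → a.getD p 0 ≤ a.getD q 0 := by
  intro p q hpq hqH hq
  rcases Nat.lt_or_eq_of_le hpq with hlt | heq
  · have hpd : p < (a.take H).length := by simp [List.length_take]; omega
    have hqd : q < (a.take H).length := by simp [List.length_take]; omega
    have := (List.pairwise_iff_getElem.mp h) p q hpd hqd hlt
    rw [List.getElem_take, List.getElem_take] at this
    rw [getD_eq_getElem' a p (by omega), getD_eq_getElem' a q hq]
    exact this
  · subst heq; exact le_refl _

-- membership of an in-range suffix element
theorem getD_mem_drop (a : List Int) (L k : Nat) (hL : L ≤ k) (hk : k < a.length) :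
    a.getD k 0 ∈ a.drop L := by
  refine List.mem_iff_getElem?.mpr ⟨k - L, ?_⟩
  rw [List.getElem?_drop]
  have h2 : L + (k - L) = k := by omega
  rw [h2, List.getElem?_eq_getElem hk, getD_eq_getElem' a k hk]

-- membership of an in-range prefix element
theorem getD_mem_take (a : List Int) (H k : Nat) (hk : k < H) (hka : k < a.length) :
    a.getD k 0 ∈ a.take H := by
  have hkd : k < (a.take H).length := by simp [List.length_take]; omega
  have h1 : a.getD k 0 = (a.take H)[k] := by
    rw [List.getElem_take, getD_eq_getElem' a k hka]
  rw [h1]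
  exact List.getElem_mem hkd

theorem getLastD_eq_getD (a : List Int) (h : a ≠ []) :
    a.getLastD 0 = a.getD (a.length - 1) 0 := by
  induction a with
  | nil => simp at h
  | cons x xs ih =>
    cases xs with
    | nil => simp
    | cons y ys =>
      have h2 : (y :: ys : List Int) ≠ [] := by simp
      simp only [List.getLastD_cons, List.length_cons] at *
      rw [ih h2]
      simp
      rfl

-- binary search characterisation on a window [L,H) that is index-monotone
theorem bisectLeft_spec (a : List Int) (x : Int) (L H : Nat)
    (hm : ∀ p q : Nat, L ≤ p → p ≤ q → q < H → a.getD p 0 ≤ a.getD q 0) :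
    ∀ d lo hi, hi - lo ≤ d → lo ≤ hi → L ≤ lo → hi ≤ H →
      lo ≤ bisectLeft a x lo hi ∧ bisectLeft a x lo hi ≤ hi ∧
      (∀ k, lo ≤ k → k < bisectLeft a x lo hi → a.getD k 0 < x) ∧
      (∀ k, bisectLeft a x lo hi ≤ k → k < hi → x ≤ a.getD k 0) := by
  intro d
  induction d with
  | zero =>
    intro lo hi hd hlh hL hH
    have h : ¬ lo < hi := by omega
    rw [bisectLeft, dif_neg h]
    exact ⟨le_refl _, hlh, by omega, by omega⟩
  | succ d ih =>
    intro lo hi hd hlh hL hH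
    rw [bisectLeft]
    by_cases h : lo < hi
    · rw [dif_pos h]
      simp only []
      have hmlo : lo ≤ (lo+hi)/2 := by omega
      have hmhi : (lo+hi)/2 < hi := by omega
      by_cases hx : a.getD ((lo+hi)/2) 0 < x
      · rw [if_pos hx]
        obtain ⟨h1, h2, h3, h4⟩ := ih ((lo+hi)/2+1) hi (by omega) (by omega) (by omega) hH
        refine ⟨by omega, h2, ?_, h4⟩
        intro k hk1 hk2
        by_cases hkm : (lo+hi)/2+1 ≤ k
        · exact h3 k hkm hk2
        · have : a.getD k 0 ≤ a.getD ((lo+hi)/2) 0 :=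
            hm k ((lo+hi)/2) (by omega) (by omega) (by omega)
          linarith
      · rw [if_neg hx]
        obtain ⟨h1, h2, h3, h4⟩ := ih lo ((lo+hi)/2) (by omega) (by omega) hL (by omega)
        refine ⟨h1, by omega, h3, ?_⟩
        intro k hk1 hk2
        by_cases hkm : k < (lo+hi)/2
        · exact h4 k hk1 hkm
        · have : a.getD ((lo+hi)/2) 0 ≤ a.getD k 0 :=
            hm ((lo+hi)/2) k (by omega) (by omega) (by omega)
          linarith
    · rw [dif_neg h]
      exact ⟨le_refl _, hlh, by omega, by omega⟩

theorem bisectRight_spec (a : List Int) (x : Int) (L H : Nat)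
    (hm : ∀ p q : Nat, L ≤ p → p ≤ q → q < H → a.getD p 0 ≤ a.getD q 0) :
    ∀ d lo hi, hi - lo ≤ d → lo ≤ hi → L ≤ lo → hi ≤ H →
      lo ≤ bisectRight a x lo hi ∧ bisectRight a x lo hi ≤ hi ∧
      (∀ k, lo ≤ k → k < bisectRight a x lo hi → a.getD k 0 ≤ x) ∧
      (∀ k, bisectRight a x lo hi ≤ k → k < hi → x < a.getD k 0) := by
  intro d
  induction d with
  | zero =>
    intro lo hi hd hlh hL hH
    have h : ¬ lo < hi := by omega
    rw [bisectRight, dif_neg h]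
    exact ⟨le_refl _, hlh, by omega, by omega⟩
  | succ d ih =>
    intro lo hi hd hlh hL hH
    rw [bisectRight]
    by_cases h : lo < hi
    · rw [dif_pos h]
      simp only []
      have hmlo : lo ≤ (lo+hi)/2 := by omega
      have hmhi : (lo+hi)/2 < hi := by omega
      by_cases hx : a.getD ((lo+hi)/2) 0 ≤ x
      · rw [if_pos hx]
        obtain ⟨h1, h2, h3, h4⟩ := ih ((lo+hi)/2+1) hi (by omega) (by omega) (by omega) hH
        refine ⟨by omega, h2, ?_, h4⟩
        intro k hk1 hk2
        by_cases hkm : (lo+hi)/2+1 ≤ k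
        · exact h3 k hkm hk2
        · have : a.getD k 0 ≤ a.getD ((lo+hi)/2) 0 :=
            hm k ((lo+hi)/2) (by omega) (by omega) (by omega)
          linarith
      · rw [if_neg hx]
        obtain ⟨h1, h2, h3, h4⟩ := ih lo ((lo+hi)/2) (by omega) (by omega) hL (by omega)
        refine ⟨h1, by omega, h3, ?_⟩
        intro k hk1 hk2
        by_cases hkm : k < (lo+hi)/2
        · exact h4 k hk1 hkm
        · have : a.getD ((lo+hi)/2) 0 ≤ a.getD k 0 :=
            hm ((lo+hi)/2) k (by omega) (by omega) (by omega)
          linarith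
    · rw [dif_neg h]
      exact ⟨le_refl _, hlh, by omega, by omega⟩

-- when everything in the window is below x, the search runs off its right end
theorem bisectLeft_all_lt (a : List Int) (x : Int) :
    ∀ d lo hi, hi - lo ≤ d → lo ≤ hi →
      (∀ k, lo ≤ k → k < hi → a.getD k 0 < x) → bisectLeft a x lo hi = hi := by
  intro d
  induction d with
  | zero =>
    intro lo hi hd hlh hall
    have h : ¬ lo < hi := by omega
    rw [bisectLeft, dif_neg h]
    omega
  | succ d ih =>
    intro lo hi hd hlh hall
    rw [bisectLeft]
    by_cases h : lo < hi
    · rw [dif_pos h]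
      simp only []
      rw [if_pos (hall ((lo+hi)/2) (by omega) (by omega))]
      exact ih ((lo+hi)/2+1) hi (by omega) (by omega) (fun k hk1 hk2 => hall k (by omega) hk2)
    · rw [dif_neg h]; omega

-- when everything in the window is above x, the search runs off its left end
theorem bisectRight_all_gt (a : List Int) (x : Int) :
    ∀ d lo hi, hi - lo ≤ d → lo ≤ hi →
      (∀ k, lo ≤ k → k < hi → x < a.getD k 0) → bisectRight a x lo hi = lo := by
  intro d
  induction d with
  | zero =>
    intro lo hi hd hlh hall
    have h : ¬ lo < hi := by omega
    rw [bisectRight, dif_neg h]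
  | succ d ih =>
    intro lo hi hd hlh hall
    rw [bisectRight]
    by_cases h : lo < hi
    · rw [dif_pos h]
      simp only []
      rw [if_neg (not_le.mpr (hall ((lo+hi)/2) (by omega) (by omega)))]
      exact ih lo ((lo+hi)/2) (by omega) (by omega) (fun k hk1 hk2 => hall k hk1 (by omega))
    · rw [dif_neg h]

-- the upward scan bails out when everything from j on is below frame
theorem upA_none (frame : Int) (a : List Int) (hne : a ≠ []) :
    ∀ f j, j < a.length → a.length - j ≤ f →
      (∀ k, j ≤ k → k < a.length → a.getD k 0 < frame) →
      findFrameUpA frame a j f = none := by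
  intro f
  induction f with
  | zero => intro j hj hf hall; omega
  | succ f ih =>
    intro j hj hf hall
    rw [findFrameUpA, if_pos (hall j (le_refl j) hj)]
    by_cases he : a.getD j 0 = a.getLastD 0
    · rw [if_pos he]
    · rw [if_neg he]
      have hj1 : j + 1 < a.length := by
        rcases Nat.lt_or_ge (j+1) a.length with h | h
        · exact h
        · exfalso
          have : j = a.length - 1 := by omega
          rw [this, ← getLastD_eq_getD a hne] at he
          exact he rfl
      exact ih (j+1) hj1 (by omega) (fun k hk1 hk2 => hall k (by omega) hk2)

-- the upward scan stops exactly at the boundary r (suffix from L index-monotone)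
theorem upA_some (frame : Int) (a : List Int) (hne : a ≠ []) (L : Nat)
    (hm : ∀ p q : Nat, L ≤ p → p ≤ q → q < a.length → a.getD p 0 ≤ a.getD q 0)
    (r : Nat) (hrn : r < a.length) (hfr : frame ≤ a.getD r 0) :
    ∀ f j, L ≤ j → j ≤ r → a.length - j ≤ f →
      (∀ k, j ≤ k → k < r → a.getD k 0 < frame) →
      findFrameUpA frame a j f = some r := by
  intro f
  induction f with
  | zero => intro j hL hj hf hlow; omega
  | succ f ih =>
    intro j hL hj hf hlow
    by_cases hjr : j = r
    · subst hjr
      rw [findFrameUpA, if_neg (by linarith)]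
    · have hjr' : j < r := by omega
      have hjf : a.getD j 0 < frame := hlow j (le_refl j) hjr'
      rw [findFrameUpA, if_pos (by linarith)]
      have hlst : a.getD r 0 ≤ a.getLastD 0 := by
        rw [getLastD_eq_getD a hne]
        exact hm r (a.length - 1) (by omega) (by omega) (by omega)
      have hne' : a.getD j 0 ≠ a.getLastD 0 := by
        intro he; rw [he] at hjf; linarith
      rw [if_neg hne']
      exact ih (j+1) (by omega) (by omega) (by omega) (fun k hk1 hk2 => hlow k (by omega) hk2)

-- the downward scan bails out when everything up to j is above frame
theorem downA_none (frame : Int) (a : List Int) :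
    ∀ j, (∀ k, k ≤ j → frame < a.getD k 0) → findFrameDownA frame a j = none := by
  intro j
  induction j with
  | zero => intro hall; rw [findFrameDownA, if_pos (hall 0 (le_refl 0))]
  | succ j ih =>
    intro hall
    rw [findFrameDownA, if_pos (hall (j+1) (le_refl _))]
    exact ih (fun k hk => hall k (by omega))

-- the downward scan stops exactly at b-1, the last index whose value is ≤ frame
theorem downA_some (frame : Int) (a : List Int) (b : Nat) (hb : 1 ≤ b)
    (hbl : a.getD (b-1) 0 ≤ frame) :
    ∀ j, b - 1 ≤ j → (∀ k, b ≤ k → k ≤ j → frame < a.getD k 0) →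
      findFrameDownA frame a j = some (b-1) := by
  intro j
  induction j with
  | zero =>
    intro hj hup
    have hb1 : b = 1 := by omega
    rw [hb1] at hbl
    rw [findFrameDownA, if_neg (by simpa using not_lt.mpr hbl), hb1]
  | succ j ih =>
    intro hj hup
    by_cases hbj : b ≤ j + 1
    · rw [findFrameDownA, if_pos (hup (j+1) hbj (le_refl _))]
      exact ih (by omega) (fun k hk1 hk2 => hup k hk1 (by omega))
    · have hbj' : b - 1 = j + 1 := by omega
      have hle : a.getD (j+1) 0 ≤ frame := hbj' ▸ hbl
      rw [findFrameDownA, if_neg (not_lt.mpr hle), hbj']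

-- ===== VERDICT (by name: the statement is the Claim_ definition above) =====
theorem findFrame_spec : Claim_equal_findFrame := by
  intro i frame a _hdom hpre
  obtain ⟨hne, hi0, hside⟩ := hpre
  unfold Spec_findFrame
  have hn : 0 < a.length := List.length_pos_iff.mpr hne
  rw [findFrame, findFrame_alt, if_neg hne, if_neg hne]
  simp only []
  set J : Nat := (if i ≥ (a.length : Int) then (a.length : Int) - 1 else i).toNat with hJdef
  have hJpre : preIdx i a = J := by rw [preIdx, hJdef]
  rw [hJpre] at hside
  have hJ : J < a.length := by
    rw [hJdef]
    split
    · omega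
    · omega
  by_cases hv : a.getD J 0 = frame
  · rw [if_pos hv, if_pos hv]
  · rw [if_neg hv] at hside
    rw [if_neg hv, if_neg hv]
    by_cases hgt : frame > a.getD J 0
    · rw [if_pos hgt] at hside
      rw [if_pos hgt, if_pos hgt]
      rcases hside with hsort | hall
      · -- sorted suffix: both find the bracketing pair by boundary r
        have hm := drop_pairwise_mono a J hsort
        obtain ⟨hb1, hb2, hb3, hb4⟩ :=
          bisectLeft_spec a frame J a.length hm a.length J a.length
            (by omega) (by omega) (le_refl J) (le_refl _)
        set r := bisectLeft a frame J a.length with hrdef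
        by_cases hrn : r = a.length
        · rw [upA_none frame a hne a.length J hJ (by omega)
              (fun k hk1 hk2 => hb3 k hk1 (by omega)), if_pos hrn]
        · have hrlt : r < a.length := by omega
          have hfr : frame ≤ a.getD r 0 := hb4 r (le_refl r) hrlt
          have hJr : J < r := by
            rcases Nat.lt_or_ge J r with h | h
            · exact h
            · exact absurd (hb4 J h hJ) (not_le.mpr hgt)
          rw [upA_some frame a hne J hm r hrlt hfr a.length J (le_refl J) (by omega)
              (by omega) hb3, if_neg hrn]
          simp only [Option.some.injEq]
          by_cases hlt2 : frame < a.getD r 0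
          · rw [if_pos hlt2]
            have hdown : findFrameDownA frame a r = some (r - 1) :=
              downA_some frame a r (by omega) (le_of_lt (hb3 (r-1) (by omega) (by omega)))
                r (by omega)
                (fun k hk1 hk2 => by
                  have : k = r := by omega
                  rw [this]; exact hlt2)
            rw [hdown]
            simp only [Option.some.injEq]
            have : r - 1 + 1 = r := by omega
            rw [this]
          · rw [if_neg hlt2]
      · -- everything from J on is below frame: both return (-1,-1)
        have hall' : ∀ k, J ≤ k → k < a.length → a.getD k 0 < frame :=
          fun k hk1 hk2 => hall _ (getD_mem_drop a J k hk1 hk2)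
        rw [upA_none frame a hne a.length J hJ (by omega) hall',
            if_pos (bisectLeft_all_lt a frame a.length J a.length (by omega) (by omega) hall')]
    · rw [if_neg hgt] at hside
      rw [if_neg hgt, if_neg hgt]
      have hlt : frame < a.getD J 0 := by
        rcases lt_trichotomy frame (a.getD J 0) with h | h | h
        · exact h
        · exact absurd h.symm hv
        · exact absurd h hgt
      rcases hside with hsort | hall
      · -- sorted prefix: both find the bracketing pair by boundary s'
        have hm : ∀ p q : Nat, 0 ≤ p → p ≤ q → q < J + 1 → a.getD p 0 ≤ a.getD q 0 :=
          fun p q _ hpq hq => take_pairwise_mono a (J+1) hsort p q hpq hq (by omega)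
        obtain ⟨hc1, hc2, hc3, hc4⟩ :=
          bisectRight_spec a frame 0 (J+1) hm J 0 J (by omega) (by omega) (by omega) (by omega)
        set s' := bisectRight a frame 0 J with hsdef
        by_cases hs0 : s' = 0
        · have h0 : ∀ k, k ≤ J → frame < a.getD k 0 := by
            intro k hk
            rcases Nat.lt_or_ge k J with h | h
            · exact hc4 k (by omega) h
            · have : k = J := by omega
              rw [this]; exact hlt
          rw [downA_none frame a J h0, if_pos hs0]
        · have hs1 : 1 ≤ s' := by omega
          have hdown : findFrameDownA frame a J = some (s' - 1) :=
            downA_some frame a s' hs1 (hc3 (s'-1) (by omega) (by omega)) J (by omega)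
              (fun k hk1 hk2 => by
                rcases Nat.lt_or_ge k J with h | h
                · exact hc4 k hk1 h
                · have : k = J := by omega
                  rw [this]; exact hlt)
          rw [hdown, if_neg hs0]
          simp only [Option.some.injEq]
          have : s' - 1 + 1 = s' := by omega
          rw [this]
      · -- everything up to J is above frame: both return (-1,-1)
        have hall' : ∀ k, k ≤ J → frame < a.getD k 0 :=
          fun k hk => hall _ (getD_mem_take a (J+1) k (by omega) (by omega))
        rw [downA_none frame a J hall',
            if_pos (bisectRight_all_gt a frame J 0 J (by omega) (by omega)
              (fun k hk1 hk2 => hall' k (by omega)))]
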